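-- pv_equiv track=rewrite | github.com/dmart411/DNSRequester | mydns.py | countB4Dot
-- ===== SOURCE A (Python) =====
-- def countB4Dot(url):
--     values = [] #holds counter in hex and letters in hex
--     letters = [] #letters in hex
--     counter = 0 #counts length of strings before "."
--     for element in url:
--
--         if element == ".":
--             values.append(hex(counter))
--             values.extend(letters)
--             counter = 0
--             letters = []
--         else:
--             letters.append(hex(ord(element)))
--             counter+=1
--     #appends last section after exiting loop
--     values.append(hex(counter))
--     values.extend(letters)
--
--     return values
-- ===== SOURCE B (Python) =====
-- def countB4Dot(url):
--     # recursive decomposition: encode the segment before the first dot, recurse on the rest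
--     i = url.find(".")
--     if i == -1:
--         return [hex(len(url))] + [hex(ord(c)) for c in url]
--     head = url[:i]
--     return [hex(len(head))] + [hex(ord(c)) for c in head] + countB4Dot(url[i+1:])
-- ===== Notes on version B (the rewrite author's own statement) =====
-- stated objective: alternative
-- what changed: B is a recursive divide-and-conquer on the first dot: it encodes the leading segment (hex length then char hexes) and recurses on the remainder, replacing A's single-pass character state machine with its running counter, letters buffer and duplicated post-loop flush.
import Mathlib
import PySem

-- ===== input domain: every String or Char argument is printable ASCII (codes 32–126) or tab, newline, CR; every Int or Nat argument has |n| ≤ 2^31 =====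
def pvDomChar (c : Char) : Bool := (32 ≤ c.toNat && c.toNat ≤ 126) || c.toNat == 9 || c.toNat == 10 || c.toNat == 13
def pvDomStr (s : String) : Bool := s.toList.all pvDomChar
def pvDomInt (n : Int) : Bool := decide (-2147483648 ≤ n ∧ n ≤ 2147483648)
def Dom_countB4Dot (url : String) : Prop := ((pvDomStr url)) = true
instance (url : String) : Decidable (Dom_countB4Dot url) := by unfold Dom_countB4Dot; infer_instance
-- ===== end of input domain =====

-- B replaces A's single-pass character state machine (running counter + letters buffer +
-- duplicated post-loop flush) by a recursion on the first dot; objective: alternative.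

-- Python's hex(n) for n ≥ 0 (both sources call the builtin hex on nonnegative ints)
def pyHexDigit (n : Nat) : Char := if n < 10 then Char.ofNat (48 + n) else Char.ofNat (87 + n)

def pyHexDigits : Nat → List Char
  | 0 => []
  | n + 1 => pyHexDigits ((n + 1) / 16) ++ [pyHexDigit ((n + 1) % 16)]
decreasing_by exact Nat.div_lt_self (Nat.succ_pos n) (by omega)

def pyHex (n : Nat) : String := String.ofList ('0' :: 'x' :: (if n = 0 then ['0'] else pyHexDigits n))

-- ===== PORT A =====
-- state: (values, letters, counter), exactly A's loop
def countB4DotGo : List Char → List String → List String → Nat → List String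
  | [], values, letters, counter => values ++ [pyHex counter] ++ letters
  | c :: rest, values, letters, counter =>
    if c == '.' then countB4DotGo rest (values ++ [pyHex counter] ++ letters) [] 0
    else countB4DotGo rest values (letters ++ [pyHex c.toNat]) (counter + 1)

def countB4Dot (url : String) : List String := countB4DotGo url.toList [] [] 0

-- ===== PORT B =====
-- Source B: url.find('.') = -1 ↔ no '.' in the list; url[:i] = takeWhile, url[i+1:] = tail of dropWhile
def countB4DotAltGo (cs : List Char) : List String :=
  if h : cs.contains '.' then
    let head := cs.takeWhile (· != '.')
    (pyHex head.length :: head.map (fun c => pyHex c.toNat))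
      ++ countB4DotAltGo ((cs.dropWhile (· != '.')).tail)
  else
    pyHex cs.length :: cs.map (fun c => pyHex c.toNat)
termination_by cs.length
decreasing_by
  have hd : cs.dropWhile (· != '.') ≠ [] := by
    intro hnil
    have := List.contains_iff_exists_mem_beq.mp h
    obtain ⟨x, hx, hbeq⟩ := this
    have hx' : x = '.' := (by simpa using hbeq : ('.' : Char) = x).symm
    subst hx'
    have : (fun c => c != '.') '.' = true := by
      have := List.dropWhile_eq_nil_iff.mp hnil
      exact this '.' hx
    simp at this
  have h1 : (cs.dropWhile (· != '.')).length ≤ cs.length := List.length_dropWhile_le _ _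
  have h2 : ((cs.dropWhile (· != '.')).tail).length < (cs.dropWhile (· != '.')).length :=
    by cases h' : cs.dropWhile (· != '.') with
    | nil => exact absurd h' hd
    | cons y ys => simp
  omega

def countB4Dot_alt (url : String) : List String := countB4DotAltGo url.toList

-- ===== PRECONDITION & SPEC =====
def Spec_countB4Dot (url : String) (out : List String) : Prop := out = countB4Dot_alt url
instance (url : String) (out : List String) : Decidable (Spec_countB4Dot url out) := by unfold Spec_countB4Dot; infer_instance

-- ===== CLAIM (what is proved, stated in full; the proofs are below) =====
def Claim_equal_countB4Dot : Prop := ∀ (url : String), Dom_countB4Dot url → Spec_countB4Dot url (countB4Dot url)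

-- ===== LEMMAS AND PROOFS =====

-- encoding of one segment
def pvEncSeg (seg : List Char) : List String := pyHex seg.length :: seg.map (fun c => pyHex c.toNat)

-- A's loop produces the flatMap of segment encodings over splitOn
theorem pvGo_eq (cs : List Char) : ∀ (pre : List Char) (values : List String),
    countB4DotGo cs values (pre.map (fun c => pyHex c.toNat)) pre.length =
      values ++ ((cs.splitOn '.').modifyHead (pre ++ ·)).flatMap pvEncSeg := by
  induction cs with
  | nil => intro pre values; simp [countB4DotGo, List.splitOn, List.splitOnP_nil, pvEncSeg]
  | cons c rest ih =>
    intro pre values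
    by_cases hc : c = '.'
    · subst hc
      obtain ⟨s, ss, hs⟩ := List.exists_cons_of_ne_nil (List.splitOnP_ne_nil (· == '.') rest)
      have h0 := ih [] (values ++ [pyHex pre.length] ++ pre.map (fun c => pyHex c.toNat))
      simp only [List.map_nil, List.length_nil] at h0
      simp only [countB4DotGo, beq_self_eq_true, if_true]
      rw [h0]
      simp only [List.splitOn] at *
      rw [List.splitOnP_cons]
      simp [hs, List.modifyHead, pvEncSeg]
    · obtain ⟨s, ss, hs⟩ := List.exists_cons_of_ne_nil (List.splitOnP_ne_nil (· == '.') rest)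
      have h1 := ih (pre ++ [c]) values
      simp only [List.map_append, List.map_cons, List.map_nil, List.length_append,
        List.length_cons, List.length_nil] at h1
      simp only [countB4DotGo, if_neg (show ¬((c == '.') = true) by simpa using hc)]
      rw [h1]
      simp only [List.splitOn] at *
      rw [List.splitOnP_cons, if_neg (by simpa using hc), hs]
      simp [List.modifyHead, List.append_assoc]

-- splitOn at the first dot
theorem pvSplitOn_first (cs : List Char) :
    cs.splitOn '.' =
      if cs.contains '.' then
        cs.takeWhile (· != '.') :: ((cs.dropWhile (· != '.')).tail).splitOn '.'
      else [cs] := by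
  induction cs with
  | nil => simp [List.splitOn, List.splitOnP_nil]
  | cons c rest ih =>
    by_cases hc : c = '.'
    · subst hc
      simp [List.splitOn, List.splitOnP_cons, List.takeWhile, List.dropWhile]
    · have hcb : (c == '.') = false := by simpa using hc
      simp only [List.splitOn] at *
      rw [List.splitOnP_cons, if_neg (by simp [hcb]), ih]
      have hne : (c != '.') = true := by simp [hc]
      by_cases hr : ('.':Char) ∈ rest
      · simp [hr, hne, Ne.symm hc, List.takeWhile, List.dropWhile, List.modifyHead]
      · simp [hr, Ne.symm hc, List.modifyHead]

-- B's recursion produces the same flatMap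
theorem pvAltGo_eq (cs : List Char) :
    countB4DotAltGo cs = (cs.splitOn '.').flatMap pvEncSeg := by
  fun_induction countB4DotAltGo cs with
  | case1 cs h head ih =>
    rw [pvSplitOn_first cs, if_pos h]
    simp only [List.flatMap_cons]
    rw [← ih]
    rfl
  | case2 cs h =>
    rw [pvSplitOn_first cs, if_neg (by simpa using h)]
    simp [pvEncSeg]

-- ===== VERDICT (by name: the statement is the Claim_ definition above) =====
theorem countB4Dot_spec : Claim_equal_countB4Dot := by
  intro url _
  unfold Spec_countB4Dot countB4Dot countB4Dot_alt
  have h := pvGo_eq url.toList [] []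
  simp only [List.map_nil, List.length_nil] at h
  rw [h]
  have hm : ∀ l : List (List Char), l.modifyHead ([] ++ ·) = l := by
    intro l; cases l <;> simp [List.modifyHead]
  rw [hm, pvAltGo_eq]
  simp
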